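-- pv_equiv track=rewrite | github.com/riffluv/work1 | scripts/check-coconala-temperature-buckets.py | opening_block
-- ===== SOURCE A (Python) =====
-- def opening_block(text: str) -> str:
--     lines: list[str] = []
--     for raw_line in text.splitlines():
--         line = raw_line.strip()
--         if not line:
--             if lines:
--                 break
--             continue
--         lines.append(line)
--     return "\n".join(lines)
-- ===== SOURCE B (Python) =====
-- def opening_block(text: str) -> str:
--     ss = [l.strip() for l in text.splitlines()]
--     i = 0
--     while i < len(ss) and not ss[i]:
--         i += 1
--     j = i
--     while j < len(ss) and ss[j]:
--         j += 1
--     return "\n".join(ss[i:j])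
-- ===== Notes on version B (the rewrite author's own statement) =====
-- stated objective: alternative
-- what changed: Replaces A's single stateful loop with break/continue and an accumulator list by a two-phase index scan (skip leading blanks, then find the end of the first non-blank run) followed by one slice-and-join.
import Mathlib
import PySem

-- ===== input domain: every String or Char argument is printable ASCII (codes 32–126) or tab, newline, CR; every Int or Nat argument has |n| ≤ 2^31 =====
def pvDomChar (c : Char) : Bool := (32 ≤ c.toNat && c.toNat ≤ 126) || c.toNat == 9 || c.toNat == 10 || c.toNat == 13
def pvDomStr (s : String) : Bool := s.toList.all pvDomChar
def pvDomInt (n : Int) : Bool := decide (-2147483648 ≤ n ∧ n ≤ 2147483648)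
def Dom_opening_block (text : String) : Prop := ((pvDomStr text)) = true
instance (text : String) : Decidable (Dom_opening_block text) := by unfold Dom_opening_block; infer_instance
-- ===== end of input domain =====

-- B replaces A's single break/continue accumulator loop by a two-phase index scan plus one slice-and-join (objective: alternative decomposition, same cost).

-- ===== PORT A =====
-- the for-loop with break/continue and accumulator `lines`
def pvLoopA (ls : List String) (acc : List String) : List String :=
  match ls with
  | [] => acc
  | raw :: rest =>
    let line := PySem.Str.strip raw
    if line = "" then
      (if acc ≠ [] then acc else pvLoopA rest acc)   -- break / continue
    else
      pvLoopA rest (acc ++ [line])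

def opening_block (text : String) : String :=
  PySem.Str.join "\n" (pvLoopA (PySem.Str.splitlines text) [])

-- ===== PORT B =====
-- while i < len(ss) and not ss[i]: i += 1
def pvScanBlank (ss : List String) (i : Nat) : Nat :=
  if h : i < ss.length then
    (if ss[i] = "" then pvScanBlank ss (i + 1) else i)
  else i
termination_by ss.length - i

-- while j < len(ss) and ss[j]: j += 1
def pvScanBlock (ss : List String) (j : Nat) : Nat :=
  if h : j < ss.length then
    (if ss[j] ≠ "" then pvScanBlock ss (j + 1) else j)
  else j
termination_by ss.length - j

def opening_block_alt (text : String) : String :=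
  let ss := (PySem.Str.splitlines text).map PySem.Str.strip
  let i := pvScanBlank ss 0
  let j := pvScanBlock ss i
  PySem.Str.join "\n" (PySem.List.slice ss (some (i : Int)) (some (j : Int)))

-- ===== PRECONDITION & SPEC =====
def Spec_opening_block (text : String) (out : String) : Prop := out = opening_block_alt text
instance (text : String) (out : String) : Decidable (Spec_opening_block text out) := by unfold Spec_opening_block; infer_instance

-- ===== CLAIM (what is proved, stated in full; the proofs are below) =====
def Claim_equal_opening_block : Prop := ∀ (text : String), Dom_opening_block text → Spec_opening_block text (opening_block text)

-- ===== LEMMAS AND PROOFS =====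

-- A's loop, characterised: with empty acc it is takeWhile-after-dropWhile of the stripped lines.
theorem pvLoopA_ne (ls : List String) (acc : List String) (h : acc ≠ []) :
    pvLoopA ls acc = acc ++ (ls.map PySem.Str.strip).takeWhile (fun s => s ≠ "") := by
  induction ls generalizing acc with
  | nil => simp [pvLoopA]
  | cons raw rest ih =>
    simp only [pvLoopA, List.map_cons, List.takeWhile_cons]
    by_cases hs : PySem.Str.strip raw = "" <;> simp [hs, h, ih, List.append_assoc]

theorem pvLoopA_nil (ls : List String) :
    pvLoopA ls [] =
      ((ls.map PySem.Str.strip).dropWhile (fun s => s = "")).takeWhile (fun s => s ≠ "") := by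
  induction ls with
  | nil => simp [pvLoopA]
  | cons raw rest ih =>
    simp only [pvLoopA, List.map_cons, List.dropWhile_cons]
    by_cases hs : PySem.Str.strip raw = ""
    · simp [hs, ih]
    · rw [if_neg hs, List.nil_append, pvLoopA_ne rest [PySem.Str.strip raw] (by simp)]
      simp [hs]

theorem pvScanBlank_eq (ss : List String) (i : Nat) (hi : i ≤ ss.length) :
    pvScanBlank ss i = i + ((ss.drop i).takeWhile (fun s => s = "")).length := by
  fun_induction pvScanBlank ss i with
  | case1 i h hs ih =>
    rw [ih (by omega)]
    rw [List.drop_eq_getElem_cons h, List.takeWhile_cons]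
    simp [hs]; omega
  | case2 i h hs =>
    rw [List.drop_eq_getElem_cons h, List.takeWhile_cons]
    simp [hs]
  | case3 i h =>
    have : ss.drop i = [] := List.drop_eq_nil_of_le (by omega)
    simp [this]

theorem pvScanBlock_eq (ss : List String) (j : Nat) (hj : j ≤ ss.length) :
    pvScanBlock ss j = j + ((ss.drop j).takeWhile (fun s => s ≠ "")).length := by
  fun_induction pvScanBlock ss j with
  | case1 j h hs ih =>
    rw [ih (by omega)]
    rw [List.drop_eq_getElem_cons h, List.takeWhile_cons]
    simp [hs]; omega
  | case2 j h hs =>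
    rw [List.drop_eq_getElem_cons h, List.takeWhile_cons]
    simp [hs]
  | case3 j h =>
    have : ss.drop j = [] := List.drop_eq_nil_of_le (by omega)
    simp [this]

-- B's slice equals takeWhile-after-dropWhile.
theorem pvSlice_eq (ss : List String) :
    PySem.List.slice ss (some ((pvScanBlank ss 0 : Nat) : Int))
        (some ((pvScanBlock ss (pvScanBlank ss 0) : Nat) : Int)) =
      (ss.dropWhile (fun s => s = "")).takeWhile (fun s => s ≠ "") := by
  have hi : pvScanBlank ss 0 = ((ss.takeWhile (fun s => s = "")).length) := by
    simpa using pvScanBlank_eq ss 0 (by omega)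
  have hi_le : pvScanBlank ss 0 ≤ ss.length := by
    rw [hi]; exact (List.takeWhile_sublist _).length_le
  have hdrop : ss.drop (pvScanBlank ss 0) = ss.dropWhile (fun s => s = "") := by
    rw [hi]
    nth_rewrite 2 [← List.takeWhile_append_dropWhile (p := fun s => decide (s = "")) (l := ss)]
    rw [List.drop_left]
  have hj : pvScanBlock ss (pvScanBlank ss 0) =
      pvScanBlank ss 0 + ((ss.dropWhile (fun s => s = "")).takeWhile (fun s => s ≠ "")).length := by
    rw [pvScanBlock_eq ss _ hi_le, hdrop]
  rw [PySem.List.slice_natCast, hdrop, hj]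
  have : pvScanBlank ss 0 +
      ((ss.dropWhile (fun s => s = "")).takeWhile (fun s => s ≠ "")).length - pvScanBlank ss 0 =
      ((ss.dropWhile (fun s => s = "")).takeWhile (fun s => s ≠ "")).length := by omega
  rw [this]
  exact ((List.prefix_iff_eq_take.mp (List.takeWhile_prefix _))).symm

-- ===== VERDICT (by name: the statement is the Claim_ definition above) =====
theorem opening_block_spec : Claim_equal_opening_block := by
  intro text _
  unfold Spec_opening_block
  simp only [opening_block, opening_block_alt]
  rw [pvLoopA_nil, pvSlice_eq]
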